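-- pv_equiv track=rewrite | github.com/fluiddyn/transonic | src/transonic/analyses/blocks_if.py | get_signatures_from_comments
-- ===== SOURCE A (Python) =====
-- def find_index_closing_parenthesis(string: str):
--     """Find the index of the closing parenthesis"""
--     assert string.startswith("("), "string has to start with '('"
--     stack = []
--     for index, letter in enumerate(string):
--         if letter == "(":
--             stack.append(letter)
--         elif letter == ")":
--             stack.pop()
--             if not stack:
--                 return index
--
--     raise SyntaxError(f"Transonic syntax error for string {string}")
--
-- def get_signatures_from_comments(comments):
--     """Get the blocks signatures for a block"""
--
--     comments = comments.replace("#", "").replace("\n", "")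
--
--     signatures_tmp = [
--         sig.split("->", 1)[0].strip()
--         for sig in comments.split("transonic block")[1:]
--     ]
--
--     signatures = []
--     for sig in signatures_tmp:
--         if sig.startswith("("):
--             sig = sig[1 : find_index_closing_parenthesis(sig)]
--         signatures.append(sig)
--
--     signatures_tmp = signatures
--     signatures = []
--     for sig_str in signatures_tmp:
--         signature = {}
--         type_vars_strs = [tmp.strip() for tmp in sig_str.split(";")]
--         type_vars_strs = [tmp for tmp in type_vars_strs if tmp]
--
--         for type_vars_str in type_vars_strs:
--             type_as_str, vars_str = type_vars_str.strip().split(" ", 1)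
--
--             for var_str in vars_str.split(","):
--                 var_str = var_str.strip()
--                 signature[var_str] = type_as_str
--         signatures.append(signature)
--
--     return signatures
-- ===== SOURCE B (Python) =====
-- MARKER = "transonic block"
--
--
-- def find_index_closing_parenthesis(string: str):
--     """Index of the matching ')' found with a depth counter (no stack)."""
--     assert string.startswith("("), "string has to start with '('"
--     depth = 0
--     for index, letter in enumerate(string):
--         if letter == "(":
--             depth += 1
--         elif letter == ")":
--             depth -= 1
--             if depth == 0:
--                 return index
--     raise SyntaxError(f"Transonic syntax error for string {string}")
--
--
-- def _split_commas(s):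
--     cut = s.find(",")
--     return [s] if cut == -1 else [s[:cut]] + _split_commas(s[cut + 1:])
--
--
-- def _pairs(sig_str):
--     """Flat list of (var, type) pairs: cut at the first ';' and recurse."""
--     cut = sig_str.find(";")
--     seg = (sig_str if cut == -1 else sig_str[:cut]).strip()
--     here = []
--     if seg:
--         sp = seg.index(" ")
--         type_as_str, vars_str = seg[:sp], seg[sp + 1:]
--         here = [(v.strip(), type_as_str) for v in _split_commas(vars_str)]
--     return here + ([] if cut == -1 else _pairs(sig_str[cut + 1:]))
--
--
-- def _parse(text):
--     """One signature dict per block marker, by recursive descent on the text."""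
--     nxt = text.find(MARKER)
--     piece = text if nxt == -1 else text[:nxt]
--     arrow = piece.find("->")
--     sig = (piece if arrow == -1 else piece[:arrow]).strip()
--     if sig.startswith("("):
--         sig = sig[1:find_index_closing_parenthesis(sig)]
--     return [dict(_pairs(sig))] + ([] if nxt == -1 else _parse(text[nxt + len(MARKER):]))
--
--
-- def get_signatures_from_comments(comments):
--     """Get the blocks signatures for a block"""
--     text = comments.replace("#", "").replace("\n", "")
--     start = text.find(MARKER)
--     return [] if start == -1 else _parse(text[start + len(MARKER):])
-- ===== Notes on version B (the rewrite author's own statement) =====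
-- stated objective: alternative
-- what changed: B replaces A's split/strip pipeline (three sequential passes over lists produced by str.split) with a recursive-descent parser that cuts the text with str.find and slicing, replaces the stack in find_index_closing_parenthesis by a depth counter, and builds each signature as a flat (var, type) pair list fed to dict() instead of nested insert loops over split lists.
import Mathlib
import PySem

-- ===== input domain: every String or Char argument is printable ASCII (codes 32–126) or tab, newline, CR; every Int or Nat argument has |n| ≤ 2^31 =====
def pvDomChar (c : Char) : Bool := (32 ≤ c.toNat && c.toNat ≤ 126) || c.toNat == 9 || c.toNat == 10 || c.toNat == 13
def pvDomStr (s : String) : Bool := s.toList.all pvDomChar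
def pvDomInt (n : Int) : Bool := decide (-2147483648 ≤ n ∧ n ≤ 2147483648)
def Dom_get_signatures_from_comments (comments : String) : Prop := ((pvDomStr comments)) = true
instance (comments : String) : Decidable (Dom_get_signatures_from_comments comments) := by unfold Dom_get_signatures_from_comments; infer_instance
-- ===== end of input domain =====

-- B replaces A's split/strip pipeline by a recursive-descent parser (str.find + slicing), a depth
-- counter instead of a stack in the paren helper, and a flat (var, type) pair list fed to dict();
-- objective: alternative. Both ports work on List Char (Python str) and convert the resulting
-- dict items to String pairs at the same boundary; on inputs where the Python raises (excluded
-- by Pre_) the ports use total defaults (Option.getD / Int.toNat of -1).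

def pvMarker : List Char :=
  ['t','r','a','n','s','o','n','i','c',' ','b','l','o','c','k']

-- ===== PORT A =====
-- helper find_index_closing_parenthesis of A: stack of '(' characters.
-- Option Nat; none = the helper's IndexError (pop of empty stack) or SyntaxError (loop ends).
-- The assert never fires: the caller guards with startswith "(".
def pvA_findClose_go (cs : List Char) (index : Nat) (stack : List Char) : Option Nat :=
  match cs with
  | [] => none                 -- SyntaxError
  | letter :: rest =>
    if letter = '(' then pvA_findClose_go rest (index + 1) (stack ++ [letter])
    else if letter = ')' then
      match stack with
      | [] => none             -- stack.pop() raises IndexError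
      | _ :: _ =>
        let stack' := stack.dropLast    -- stack.pop()
        if stack' = [] then some index
        else pvA_findClose_go rest (index + 1) stack'
    else pvA_findClose_go rest (index + 1) stack

-- the comprehension body of A's first pass: sig.split("->", 1)[0].strip()
def pvA_sig1 (sig : List Char) : List Char :=
  PySem.Chars.strip (((PySem.Chars.splitMax? sig ['-','>'] 1).getD []).getD 0 [])

-- the body of A's second loop (paren trimming); getD 0 is only reached when the helper raises
-- (Pre_ excludes those inputs)
def pvA_trim (sig : List Char) : List Char :=
  if PySem.Chars.startswith sig ['('] then
    PySem.Chars.slice sig (some 1) (some ((pvA_findClose_go sig 0 []).getD 0 : Int))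
  else sig

-- the body of A's innermost loop: type_as_str, vars_str = type_vars_str.strip().split(" ", 1);
-- getD [] is only reached on the ValueError (no space) inputs, which Pre_ excludes
def pvA_entry (signature : PySem.Dict (List Char) (List Char)) (type_vars_str : List Char) :
    PySem.Dict (List Char) (List Char) :=
  let parts := (PySem.Chars.splitMax? (PySem.Chars.strip type_vars_str) [' '] 1).getD []
  let type_as_str := parts.getD 0 []
  let vars_str := parts.getD 1 []
  ((PySem.Chars.split? vars_str [',']).getD []).foldl
    (fun signature var_str => signature.insert (PySem.Chars.strip var_str) type_as_str)
    signature

-- the body of A's third loop: one signature dict from one sig_str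
def pvA_sigdict (sig_str : List Char) : List (String × String) :=
  let type_vars_strs := ((PySem.Chars.split? sig_str [';']).getD []).map PySem.Chars.strip
  let type_vars_strs := type_vars_strs.filter (fun tmp => tmp ≠ [])
  ((type_vars_strs.foldl pvA_entry PySem.Dict.empty).items).map
    (fun p => (String.ofList p.1, String.ofList p.2))

def get_signatures_from_comments (comments : String) : List (List (String × String)) :=
  let cs := PySem.Chars.replace (PySem.Chars.replace comments.toList ['#'] []) ['\n'] []
  let signatures_tmp :=
    (((PySem.Chars.split? cs pvMarker).getD []).drop 1).map pvA_sig1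
  let signatures := signatures_tmp.foldl (fun acc sig => acc ++ [pvA_trim sig]) []
  signatures.foldl (fun acc sig_str => acc ++ [pvA_sigdict sig_str]) []

-- ===== PORT B =====
-- termination helper for B's find-based recursions (used in decreasing_by)
theorem pv_ne_nil_of_find_ne (s sub : List Char) (hsub : sub ≠ [])
    (h : PySem.Chars.find s sub ≠ -1) : s ≠ [] := by
  rintro rfl
  apply h
  show PySem.Chars.find.go sub [] 0 = -1
  rw [PySem.Chars.find.go]
  simp [List.isEmpty_iff, hsub]

-- B's find_index_closing_parenthesis: depth counter instead of a stack
def pvB_findClose_go (cs : List Char) (index : Nat) (depth : Int) : Option Nat :=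
  match cs with
  | [] => none                 -- SyntaxError
  | letter :: rest =>
    if letter = '(' then pvB_findClose_go rest (index + 1) (depth + 1)
    else if letter = ')' then
      if depth - 1 = 0 then some index
      else pvB_findClose_go rest (index + 1) (depth - 1)
    else pvB_findClose_go rest (index + 1) depth

-- B's _split_commas: cut at the first ',' and recurse
def pvB_splitCommas (s : List Char) : List (List Char) :=
  let cut := PySem.Chars.find s [',']
  if h : cut = -1 then [s]
  else s.take cut.toNat :: pvB_splitCommas (s.drop (cut.toNat + 1))
termination_by s.length
decreasing_by
  have := pv_ne_nil_of_find_ne s [','] (by simp) h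
  have : s.length ≠ 0 := by simpa [List.length_eq_zero_iff] using this
  simp; omega

-- B's _pairs: flat (var, type) pair list, cutting at the first ';' and recursing.
-- sp.toNat turns the ValueError of seg.index(" ") (find = -1) into junk; Pre_ excludes it.
def pvB_pairs (s : List Char) : List (List Char × List Char) :=
  let cut := PySem.Chars.find s [';']
  let seg := PySem.Chars.strip (if cut = -1 then s else s.take cut.toNat)
  let here :=
    if seg = [] then []
    else
      let sp := PySem.Chars.find seg [' ']
      let type_as_str := seg.take sp.toNat
      let vars_str := seg.drop (sp.toNat + 1)
      (pvB_splitCommas vars_str).map (fun v => (PySem.Chars.strip v, type_as_str))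
  here ++ (if h : cut = -1 then [] else pvB_pairs (s.drop (cut.toNat + 1)))
termination_by s.length
decreasing_by
  have := pv_ne_nil_of_find_ne s [';'] (by simp) h
  have : s.length ≠ 0 := by simpa [List.length_eq_zero_iff] using this
  simp; omega

-- B's _parse body for one piece: head before "->", strip, trim parens, dict(pairs).items
def pvB_piece (piece : List Char) : List (String × String) :=
  let arrow := PySem.Chars.find piece ['-','>']
  let sig0 := PySem.Chars.strip (if arrow = -1 then piece else piece.take arrow.toNat)
  let sig :=
    if PySem.Chars.startswith sig0 ['('] then
      PySem.Chars.slice sig0 (some 1) (some ((pvB_findClose_go sig0 0 0).getD 0 : Int))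
    else sig0
  (((pvB_pairs sig).foldl
      (fun (d : PySem.Dict (List Char) (List Char)) p => d.insert p.1 p.2)
      PySem.Dict.empty).items).map (fun p => (String.ofList p.1, String.ofList p.2))

-- B's _parse: recursive descent from marker to marker
def pvB_parse (s : List Char) : List (List (String × String)) :=
  let nxt := PySem.Chars.find s pvMarker
  if h : nxt = -1 then [pvB_piece s]
  else pvB_piece (s.take nxt.toNat) :: pvB_parse (s.drop (nxt.toNat + pvMarker.length))
termination_by s.length
decreasing_by
  have := pv_ne_nil_of_find_ne s pvMarker (by simp [pvMarker]) h
  have : s.length ≠ 0 := by simpa [List.length_eq_zero_iff] using this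
  simp [pvMarker]; omega

def get_signatures_from_comments_alt (comments : String) : List (List (String × String)) :=
  let text := PySem.Chars.replace (PySem.Chars.replace comments.toList ['#'] []) ['\n'] []
  let start := PySem.Chars.find text pvMarker
  if start = -1 then [] else pvB_parse (text.drop (start.toNat + pvMarker.length))

-- ===== PRECONDITION & SPEC =====
-- pvCloseIdx: closed-form reading of the paren helper's success: the first positive prefix length
-- at which the counts of '(' and ')' balance (some (that length - 1) = the returned index;
-- none = the helper raises).
def pvCloseIdx (cs : List Char) : Option Nat :=
  ((List.range (cs.length + 1)).find?
    (fun k => decide (0 < k ∧ (cs.take k).count '(' = (cs.take k).count ')'))).map (fun k => k - 1)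

def pvSegsOk (s : List Char) : Bool :=
  ((PySem.Chars.split? s [';']).getD []).all
    (fun seg => PySem.Chars.strip seg = [] || PySem.Chars.isIn [' '] (PySem.Chars.strip seg))

def pvSigOk (sig : List Char) : Bool :=
  if PySem.Chars.startswith sig ['('] then
    match pvCloseIdx sig with
    | none => false
    | some j => pvSegsOk (PySem.Chars.slice sig (some 1) (some (j : Int)))
  else pvSegsOk sig

-- Pre_ excludes exactly the inputs on which the Python A raises: a parenthesised signature whose
-- parentheses never balance (IndexError/SyntaxError in find_index_closing_parenthesis) or a
-- nonempty semicolon-separated segment with no space in it (ValueError from the 2-element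
-- unpacking of the maxsplit-1 split).
def Pre_get_signatures_from_comments (comments : String) : Prop :=
  ((((PySem.Chars.split?
        (PySem.Chars.replace (PySem.Chars.replace comments.toList ['#'] []) ['\n'] [])
        pvMarker).getD []).drop 1).all
    (fun piece =>
      pvSigOk (PySem.Chars.strip
        (((PySem.Chars.splitMax? piece ['-','>'] 1).getD []).getD 0 [])))) = true
instance (comments : String) : Decidable (Pre_get_signatures_from_comments comments) := by
  unfold Pre_get_signatures_from_comments; infer_instance

def pvWitness_get_signatures_from_comments : String :=
  "# transonic block (int a, b; float c) -> x"

def Spec_get_signatures_from_comments (comments : String) (out : List (List (String × String))) : Prop := out = get_signatures_from_comments_alt comments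
instance (comments : String) (out : List (List (String × String))) : Decidable (Spec_get_signatures_from_comments comments out) := by unfold Spec_get_signatures_from_comments; infer_instance

-- ===== CLAIM =====
def Claim_equal_get_signatures_from_comments : Prop := ∀ (comments : String), Dom_get_signatures_from_comments comments → Pre_get_signatures_from_comments comments → Spec_get_signatures_from_comments comments (get_signatures_from_comments comments)

-- ===== LEMMAS AND PROOFS =====

-- find characterizations ------------------------------------------------------
theorem pv_find_cons_prefix (sub : List Char) (c : Char) (t : List Char)
    (h : sub.isPrefixOf (c :: t) = true) : PySem.Chars.find (c :: t) sub = 0 := by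
  show PySem.Chars.find.go sub (c :: t) 0 = 0
  rw [PySem.Chars.find.go]
  simp [h]

theorem pv_find_go_add (sub : List Char) (hsub : sub ≠ []) :
    ∀ (l : List Char) (k : Nat), PySem.Chars.find.go sub l k =
      if PySem.Chars.find l sub = -1 then -1 else PySem.Chars.find l sub + k := by
  intro l
  induction l with
  | nil =>
    intro k
    show _ = if PySem.Chars.find.go sub [] 0 = -1 then _ else _
    rw [PySem.Chars.find.go, PySem.Chars.find.go]
    simp [List.isEmpty_iff, hsub]
  | cons c t ih =>
    intro k
    rw [PySem.Chars.find.go]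
    by_cases hp : sub.isPrefixOf (c :: t) = true
    · rw [pv_find_cons_prefix sub c t hp]
      simp [hp]
    · have hfc : PySem.Chars.find (c :: t) sub =
          if PySem.Chars.find t sub = -1 then -1 else PySem.Chars.find t sub + 1 := by
        show PySem.Chars.find.go sub (c :: t) 0 = _
        rw [PySem.Chars.find.go]
        simp only [hp, if_false]
        simpa using ih 1
      simp only [hp, if_false, hfc]
      rw [ih (k+1)]
      have hge : -1 ≤ PySem.Chars.find t sub := PySem.Chars.neg_one_le_find t sub
      by_cases h1 : PySem.Chars.find t sub = -1
      · simp [h1]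
      · have hne : ¬ (PySem.Chars.find t sub + 1 = -1) := by omega
        simp only [h1, if_false, hne]
        push_cast
        ring

theorem pv_find_cons_not (sub : List Char) (hsub : sub ≠ []) (c : Char) (t : List Char)
    (h : ¬ sub.isPrefixOf (c :: t) = true) :
    PySem.Chars.find (c :: t) sub =
      if PySem.Chars.find t sub = -1 then -1 else PySem.Chars.find t sub + 1 := by
  show PySem.Chars.find.go sub (c :: t) 0 = _
  rw [PySem.Chars.find.go]
  simp only [h, if_false]
  simpa using pv_find_go_add sub hsub t 1

theorem pv_find_nonneg_of_ne (s sub : List Char) (h : PySem.Chars.find s sub ≠ -1) :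
    0 ≤ PySem.Chars.find s sub := by
  have := PySem.Chars.neg_one_le_find s sub
  omega

-- pvSplit: B-shaped (find + slice) reading of Python's str.split ---------------
def pvSplit (sep s : List Char) : List (List Char) :=
  if hsep : sep = [] then [s]
  else
    let j := PySem.Chars.find s sep
    if hj : j = -1 then [s]
    else s.take j.toNat :: pvSplit sep (s.drop (j.toNat + sep.length))
termination_by s.length
decreasing_by
  have hs := pv_ne_nil_of_find_ne s sep hsep hj
  have : s.length ≠ 0 := by simpa [List.length_eq_zero_iff] using hs
  have : sep.length ≠ 0 := by simpa [List.length_eq_zero_iff] using hsep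
  simp; omega

def pvConsFirst (pre : List Char) : List (List Char) → List (List Char)
  | [] => [pre]
  | p :: ps => (pre ++ p) :: ps

theorem pv_find_nil (sub : List Char) (hsub : sub ≠ []) : PySem.Chars.find [] sub = -1 := by
  by_contra h
  exact pv_ne_nil_of_find_ne [] sub hsub h rfl

theorem pv_pvSplit_nil (sep : List Char) (hsep : sep ≠ []) : pvSplit sep [] = [[]] := by
  rw [pvSplit]
  simp [hsep, pv_find_nil sep hsep]

theorem pv_pvSplit_ne_nil (sep s : List Char) : pvSplit sep s ≠ [] := by
  rw [pvSplit]
  by_cases hsep : sep = []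
  · simp [hsep]
  · by_cases hj : PySem.Chars.find s sep = -1 <;> simp [hsep, hj]

theorem pv_pvSplit_cons_eq (sep s : List Char) (hsep : sep ≠ [])
    (hj : PySem.Chars.find s sep ≠ -1) :
    pvSplit sep s = s.take (PySem.Chars.find s sep).toNat ::
      pvSplit sep (s.drop ((PySem.Chars.find s sep).toNat + sep.length)) := by
  rw [pvSplit]
  simp [hsep, hj]

theorem pv_pvSplit_single (sep s : List Char) (hsep : sep ≠ [])
    (hj : PySem.Chars.find s sep = -1) : pvSplit sep s = [s] := by
  rw [pvSplit]
  simp [hsep, hj]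

theorem pv_consFirst_nil_split (sep s : List Char) :
    pvConsFirst [] (pvSplit sep s) = pvSplit sep s := by
  rcases h : pvSplit sep s with _ | ⟨p, ps⟩
  · exact absurd h (pv_pvSplit_ne_nil sep s)
  · simp [pvConsFirst]

theorem pv_pvSplit_prefix (sep : List Char) (hsep : sep ≠ []) (c : Char) (t : List Char)
    (hp : sep.isPrefixOf (c :: t) = true) :
    pvSplit sep (c :: t) = [] :: pvSplit sep ((c :: t).drop sep.length) := by
  have h0 := pv_find_cons_prefix sep c t hp
  rw [pvSplit]
  simp [hsep, h0]

theorem pv_consFirst_step (sep : List Char) (hsep : sep ≠ []) (c : Char) (t : List Char)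
    (hp : ¬ sep.isPrefixOf (c :: t) = true) (pre : List Char) :
    pvConsFirst pre (pvSplit sep (c :: t)) = pvConsFirst (pre ++ [c]) (pvSplit sep t) := by
  have hfc := pv_find_cons_not sep hsep c t hp
  by_cases h1 : PySem.Chars.find t sep = -1
  · have hfc' : PySem.Chars.find (c :: t) sep = -1 := by rw [hfc]; simp [h1]
    rw [pv_pvSplit_single sep (c :: t) hsep hfc', pv_pvSplit_single sep t hsep h1]
    simp [pvConsFirst]
  · have hj0 : 0 ≤ PySem.Chars.find t sep := pv_find_nonneg_of_ne t sep h1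
    have hfc' : PySem.Chars.find (c :: t) sep = PySem.Chars.find t sep + 1 := by
      rw [hfc]; simp [h1]
    have hne : PySem.Chars.find (c :: t) sep ≠ -1 := by rw [hfc']; omega
    have htn : (PySem.Chars.find t sep + 1).toNat = (PySem.Chars.find t sep).toNat + 1 := by
      omega
    rw [pv_pvSplit_cons_eq sep (c :: t) hsep hne, pv_pvSplit_cons_eq sep t hsep h1,
      hfc', htn]
    simp [pvConsFirst, List.take_succ_cons, Nat.add_right_comm _ 1 _, List.drop_succ_cons]

theorem pv_splitOn_go_inv (sep : List Char) (hsep : sep ≠ []) :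
    ∀ (fuel : Nat) (l cur : List Char) (acc : List (List Char)), l.length < fuel →
      PySem.Chars.splitOn.go sep fuel l cur acc
        = acc.reverse ++ pvConsFirst cur.reverse (pvSplit sep l) := by
  intro fuel
  induction fuel with
  | zero => intro l cur acc h; omega
  | succ fuel ih =>
    intro l cur acc h
    match l with
    | [] =>
      rw [PySem.Chars.splitOn.go]
      · rw [pv_pvSplit_nil sep hsep]
        simp [pvConsFirst]
      · omega
    | c :: t =>
      rw [PySem.Chars.splitOn.go]
      by_cases hp : sep.isPrefixOf (c :: t) = true
      · simp only [hp, if_true]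
        have hlen : (List.drop sep.length (c :: t)).length < fuel := by
          have : 1 ≤ sep.length := by
            rcases sep with _ | _
            · exact absurd rfl hsep
            · simp
          simp at h ⊢
          omega
        rw [ih (List.drop sep.length (c :: t)) [] (cur.reverse :: acc) hlen]
        rw [pv_pvSplit_prefix sep hsep c t hp]
        simp [pvConsFirst]
        rcases hsp : pvSplit sep (List.drop sep.length (c :: t)) with _ | ⟨p, ps⟩
        · exact absurd hsp (pv_pvSplit_ne_nil _ _)
        · simp [hsp]
      · simp only [hp, if_false]
        have hlen : t.length < fuel := by simp at h; omega
        rw [ih t (c :: cur) acc hlen]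
        rw [pv_consFirst_step sep hsep c t hp cur.reverse]
        simp

theorem pv_splitOn_eq_pvSplit (sep s : List Char) (hsep : sep ≠ []) :
    PySem.Chars.splitOn s sep = pvSplit sep s := by
  rw [PySem.Chars.splitOn]
  rw [pv_splitOn_go_inv sep hsep (s.length + 1) s [] [] (by omega)]
  simp [pv_consFirst_nil_split]

-- splitOnMax _ _ 1 characterization -------------------------------------------
def pvSplit1 (sep s : List Char) : List (List Char) :=
  let j := PySem.Chars.find s sep
  if j = -1 then [s] else [s.take j.toNat, s.drop (j.toNat + sep.length)]

theorem pv_pvSplit1_single (sep s : List Char) (hj : PySem.Chars.find s sep = -1) :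
    pvSplit1 sep s = [s] := by
  simp [pvSplit1, hj]

theorem pv_pvSplit1_cons_eq (sep s : List Char) (hj : PySem.Chars.find s sep ≠ -1) :
    pvSplit1 sep s = [s.take (PySem.Chars.find s sep).toNat,
      s.drop ((PySem.Chars.find s sep).toNat + sep.length)] := by
  simp [pvSplit1, hj]

theorem pv_pvSplit1_ne_nil (sep s : List Char) : pvSplit1 sep s ≠ [] := by
  by_cases hj : PySem.Chars.find s sep = -1 <;> simp [pvSplit1, hj]

theorem pv_consFirst1_step (sep : List Char) (hsep : sep ≠ []) (c : Char) (t : List Char)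
    (hp : ¬ sep.isPrefixOf (c :: t) = true) (pre : List Char) :
    pvConsFirst pre (pvSplit1 sep (c :: t)) = pvConsFirst (pre ++ [c]) (pvSplit1 sep t) := by
  have hfc := pv_find_cons_not sep hsep c t hp
  by_cases h1 : PySem.Chars.find t sep = -1
  · have hfc' : PySem.Chars.find (c :: t) sep = -1 := by rw [hfc]; simp [h1]
    rw [pv_pvSplit1_single sep (c :: t) hfc', pv_pvSplit1_single sep t h1]
    simp [pvConsFirst]
  · have hj0 : 0 ≤ PySem.Chars.find t sep := pv_find_nonneg_of_ne t sep h1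
    have hfc' : PySem.Chars.find (c :: t) sep = PySem.Chars.find t sep + 1 := by
      rw [hfc]; simp [h1]
    have hne : PySem.Chars.find (c :: t) sep ≠ -1 := by rw [hfc']; omega
    have htn : (PySem.Chars.find t sep + 1).toNat = (PySem.Chars.find t sep).toNat + 1 := by
      omega
    rw [pv_pvSplit1_cons_eq sep (c :: t) hne, pv_pvSplit1_cons_eq sep t h1, hfc', htn]
    simp [pvConsFirst, List.take_succ_cons, Nat.add_right_comm _ 1 _, List.drop_succ_cons]

theorem pv_splitOnMax_go_zero (sep : List Char) :
    ∀ (fuel : Nat) (l cur : List Char) (acc : List (List Char)),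
      PySem.Chars.splitOnMax.go sep fuel 0 l cur acc = acc.reverse ++ [cur.reverse ++ l] := by
  intro fuel l cur acc
  match fuel, l with
  | 0, l =>
    rw [PySem.Chars.splitOnMax.go]
    simp
  | fuel+1, [] =>
    rw [PySem.Chars.splitOnMax.go]
    · simp
    · omega
  | fuel+1, c :: t =>
    rw [PySem.Chars.splitOnMax.go]
    simp

theorem pv_splitOnMax1_go_inv (sep : List Char) (hsep : sep ≠ []) :
    ∀ (fuel : Nat) (l cur : List Char) (acc : List (List Char)), l.length < fuel →
      PySem.Chars.splitOnMax.go sep fuel 1 l cur acc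
        = acc.reverse ++ pvConsFirst cur.reverse (pvSplit1 sep l) := by
  intro fuel
  induction fuel with
  | zero => intro l cur acc h; omega
  | succ fuel ih =>
    intro l cur acc h
    match l with
    | [] =>
      rw [PySem.Chars.splitOnMax.go]
      · rw [pv_pvSplit1_single sep [] (pv_find_nil sep hsep)]
        simp [pvConsFirst]
      · omega
    | c :: t =>
      rw [PySem.Chars.splitOnMax.go]
      by_cases hp : sep.isPrefixOf (c :: t) = true
      · simp only [hp, if_true]
        rw [if_neg (by omega : ¬ (1 : Nat) = 0)]
        rw [pv_splitOnMax_go_zero sep fuel (List.drop sep.length (c :: t)) [] (cur.reverse :: acc)]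
        have hf0 := pv_find_cons_prefix sep c t hp
        rw [pv_pvSplit1_cons_eq sep (c :: t) (by rw [hf0]; omega), hf0]
        simp [pvConsFirst]
      · simp only [hp, if_false]
        rw [if_neg (by omega : ¬ (1 : Nat) = 0)]
        have hlen : t.length < fuel := by simp at h; omega
        rw [ih t (c :: cur) acc hlen]
        rw [pv_consFirst1_step sep hsep c t hp cur.reverse]
        simp

theorem pv_splitOnMax_one_eq (sep s : List Char) (hsep : sep ≠ []) :
    PySem.Chars.splitOnMax s sep 1 = pvSplit1 sep s := by
  rw [PySem.Chars.splitOnMax]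
  rw [if_neg (by omega : ¬ (1 : Int) < 0)]
  have h1 : (1 : Int).toNat = 1 := rfl
  rw [h1, pv_splitOnMax1_go_inv sep hsep (s.length + 1) s [] [] (by omega)]
  rcases hsp : pvSplit1 sep s with _ | ⟨p, ps⟩
  · exact absurd hsp (pv_pvSplit1_ne_nil sep s)
  · simp [pvConsFirst, hsp]

-- paren helpers ---------------------------------------------------------------
theorem pv_close_stack_eq_counter (cs : List Char) :
    ∀ (i d : Nat), 1 ≤ d →
      pvA_findClose_go cs i (List.replicate d '(') = pvB_findClose_go cs i (d : Int) := by
  induction cs with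
  | nil => intro i d hd; rfl
  | cons c rest ih =>
    intro i d hd
    obtain ⟨e, rfl⟩ : ∃ e, d = e + 1 := ⟨d - 1, by omega⟩
    by_cases hc1 : c = '('
    · simp only [pvA_findClose_go, pvB_findClose_go, hc1, if_true]
      have : List.replicate (e + 1) '(' ++ ['('] = List.replicate (e + 2) '(' := by
        rw [← List.replicate_succ' (n := e + 1)]
      rw [this]
      have hcast : ((e + 1 : Nat) : Int) + 1 = ((e + 2 : Nat) : Int) := by push_cast; ring
      rw [hcast]
      exact ih (i + 1) (e + 2) (by omega)
    · by_cases hc2 : c = ')'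
      · simp only [pvA_findClose_go, pvB_findClose_go, hc1, hc2, if_true, if_false]
        have hrep : List.replicate (e + 1) '(' = List.replicate e '(' ++ ['('] :=
          List.replicate_succ' ..
        rcases Nat.eq_zero_or_pos e with he | he
        · subst he
          simp
        · have hne : ¬ ((e + 1 : Nat) : Int) - 1 = 0 := by omega
          have hstack : List.replicate (e + 1) '(' ≠ [] := by simp
          rw [if_neg hne]
          rcases hrepc : List.replicate (e + 1) '(' with _ | ⟨x, xs⟩
          · exact absurd hrepc hstack
          · simp only []
            have hdrop : (x :: xs).dropLast = List.replicate e '(' := by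
              rw [← hrepc, hrep, List.dropLast_concat]
            rw [hdrop]
            have hne2 : List.replicate e '(' ≠ [] := by simp; omega
            rw [if_neg hne2]
            have hcast : ((e + 1 : Nat) : Int) - 1 = ((e : Nat) : Int) := by push_cast; ring
            rw [hcast]
            exact ih (i + 1) e (by omega)
      · simp only [pvA_findClose_go, pvB_findClose_go, hc1, hc2, if_false]
        exact ih (i + 1) (e + 1) (by omega)

theorem pv_closeAB (rest : List Char) :
    pvA_findClose_go ('(' :: rest) 0 [] = pvB_findClose_go ('(' :: rest) 0 0 := by
  simp only [pvA_findClose_go, pvB_findClose_go, if_true]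
  have h1 : ([] : List Char) ++ ['('] = List.replicate 1 '(' := rfl
  have h2 : (0 : Int) + 1 = ((1 : Nat) : Int) := rfl
  rw [h1, h2]
  exact pv_close_stack_eq_counter rest 1 1 (by omega)

theorem pv_range_find?_succ (p : Nat → Bool) (n : Nat) (h0 : ¬ p 0 = true) :
    List.find? p (List.range (n + 1)) = (List.find? (p ∘ Nat.succ) (List.range n)).map Nat.succ := by
  rw [List.range_succ_eq_map, List.find?_cons_of_neg h0, List.find?_map]

theorem pv_close_gen (cs : List Char) :
    ∀ (i d : Nat), 1 ≤ d →
      pvB_findClose_go cs i (d : Int) =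
        (((List.range (cs.length + 1)).find?
          (fun k => decide (0 < k ∧ (cs.take k).count '(' + d = (cs.take k).count ')'))).map
            (fun k => i + k - 1)) := by
  induction cs with
  | nil =>
    intro i d hd
    simp [pvB_findClose_go, List.range_succ]
  | cons c rest ih =>
    intro i d hd
    have hz : ∀ k : Nat, k = 0 →
        (rest.take k).count '(' = 0 ∧ (rest.take k).count ')' = 0 := by
      rintro k rfl; simp
    rw [show (c :: rest).length + 1 = (rest.length + 1) + 1 from by simp,
        pv_range_find?_succ _ _ (by simp), Option.map_map]
    by_cases hc1 : c = '('
    · subst hc1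
      simp only [pvB_findClose_go, if_true]
      have hps : ((fun k => decide (0 < k ∧ (('(' :: rest).take k).count '(' + d
            = (('(' :: rest).take k).count ')')) ∘ Nat.succ)
          = fun k => decide (0 < k ∧ (rest.take k).count '(' + (d + 1)
            = (rest.take k).count ')') := by
        funext k
        have e1 : (('(' :: rest).take (k + 1)).count '(' = (rest.take k).count '(' + 1 := by
          simp [List.take_succ_cons, List.count_cons]
        have e2 : (('(' :: rest).take (k + 1)).count ')' = (rest.take k).count ')' := by
          simp [List.take_succ_cons, List.count_cons]
        simp only [Function.comp, Nat.succ_eq_add_one, e1, e2, decide_eq_decide]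
        have := hz k
        omega
      rw [hps]
      have hcast : ((d : Nat) : Int) + 1 = ((d + 1 : Nat) : Int) := by push_cast; ring
      rw [hcast, ih (i + 1) (d + 1) (by omega)]
      congr 1
      funext k
      simp only [Function.comp, Nat.succ_eq_add_one]
      omega
    · by_cases hc2 : c = ')'
      · subst hc2
        simp only [pvB_findClose_go, hc1, if_true, if_false]
        have e1 : ∀ k, ((')' :: rest).take (k + 1)).count '(' = (rest.take k).count '(' := by
          intro k; simp [List.take_succ_cons, List.count_cons]
        have e2 : ∀ k, ((')' :: rest).take (k + 1)).count ')' = (rest.take k).count ')' + 1 := by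
          intro k; simp [List.take_succ_cons, List.count_cons]
        by_cases hd1 : d = 1
        · subst hd1
          rw [if_pos (by norm_num)]
          have hq0 : ((fun k => decide (0 < k ∧ ((')' :: rest).take k).count '(' + 1
              = ((')' :: rest).take k).count ')')) ∘ Nat.succ) 0 = true := by
            simp only [Function.comp, Nat.succ_eq_add_one, Nat.zero_add, e1, e2]
            simp
          rw [List.range_succ_eq_map, List.find?_cons_of_pos hq0]
          simp
        · have hne : ¬ ((d : Nat) : Int) - 1 = 0 := by omega
          rw [if_neg hne]
          have hps : ((fun k => decide (0 < k ∧ ((')' :: rest).take k).count '(' + d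
                = ((')' :: rest).take k).count ')')) ∘ Nat.succ)
              = fun k => decide (0 < k ∧ (rest.take k).count '(' + (d - 1)
                = (rest.take k).count ')') := by
            funext k
            simp only [Function.comp, Nat.succ_eq_add_one, e1, e2, decide_eq_decide]
            have := hz k
            omega
          rw [hps]
          have hcast : ((d : Nat) : Int) - 1 = ((d - 1 : Nat) : Int) := by omega
          rw [hcast, ih (i + 1) (d - 1) (by omega)]
          congr 1
          funext k
          simp only [Function.comp, Nat.succ_eq_add_one]
          omega
      · simp only [pvB_findClose_go, hc1, hc2, if_false]
        have e1 : ∀ k, ((c :: rest).take (k + 1)).count '(' = (rest.take k).count '(' := by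
          intro k; simp [List.take_succ_cons, List.count_cons, hc1]
        have e2 : ∀ k, ((c :: rest).take (k + 1)).count ')' = (rest.take k).count ')' := by
          intro k; simp [List.take_succ_cons, List.count_cons, hc2]
        have hps : ((fun k => decide (0 < k ∧ ((c :: rest).take k).count '(' + d
              = ((c :: rest).take k).count ')')) ∘ Nat.succ)
            = fun k => decide (0 < k ∧ (rest.take k).count '(' + d
              = (rest.take k).count ')') := by
          funext k
          simp only [Function.comp, Nat.succ_eq_add_one, e1, e2, decide_eq_decide]
          have := hz k
          omega
        rw [hps, ih (i + 1) d hd]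
        congr 1
        funext k
        simp only [Function.comp, Nat.succ_eq_add_one]
        omega

theorem pv_close_spec (rest : List Char) :
    pvB_findClose_go ('(' :: rest) 0 0 = pvCloseIdx ('(' :: rest) := by
  unfold pvCloseIdx
  conv_rhs =>
    rw [show ('(' :: rest).length + 1 = (rest.length + 1) + 1 from by simp,
        pv_range_find?_succ _ _ (by simp), Option.map_map]
  simp only [pvB_findClose_go, if_true]
  have h01 : (0 : Int) + 1 = ((1 : Nat) : Int) := rfl
  rw [h01, pv_close_gen rest 1 1 (by omega)]
  have hz : ∀ k : Nat, k = 0 →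
      (rest.take k).count '(' = 0 ∧ (rest.take k).count ')' = 0 := by
    rintro k rfl; simp
  have e1 : ∀ k, (('(' :: rest).take (k + 1)).count '(' = (rest.take k).count '(' + 1 := by
    intro k; simp [List.take_succ_cons, List.count_cons]
  have e2 : ∀ k, (('(' :: rest).take (k + 1)).count ')' = (rest.take k).count ')' := by
    intro k; simp [List.take_succ_cons, List.count_cons]
  have hps : ((fun k => decide (0 < k ∧ (('(' :: rest).take k).count '('
        = (('(' :: rest).take k).count ')')) ∘ Nat.succ)
      = fun k => decide (0 < k ∧ (rest.take k).count '(' + 1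
        = (rest.take k).count ')') := by
    funext k
    simp only [Function.comp, Nat.succ_eq_add_one, e1, e2, decide_eq_decide]
    have := hz k
    omega
  rw [hps]
  congr 1
  funext k
  simp only [Function.comp, Nat.succ_eq_add_one]
  omega

-- strip idempotence -----------------------------------------------------------
theorem pv_head_false (p : Char → Bool) (l : List Char) (a : Char) (t0 : List Char)
    (h : List.dropWhile p l = a :: t0) : p a = false := by
  have w : List.dropWhile p l ≠ [] := by simp [h]
  have hh := List.head_dropWhile_not p w
  simp only [h] at hh
  simpa using hh

theorem pv_key (p : Char → Bool) (a : Char) (t0 : List Char) (ha : p a = false) :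
    List.dropWhile p (List.dropWhile p (a :: t0).reverse).reverse
      = (List.dropWhile p (a :: t0).reverse).reverse := by
  obtain ⟨t, ht⟩ := List.dropWhile_suffix (l := (a :: t0).reverse) p
  have hAeq : a :: t0 = (List.dropWhile p (a :: t0).reverse).reverse ++ t.reverse := by
    have := congrArg List.reverse ht; simpa using this.symm
  rcases hBr : (List.dropWhile p (a :: t0).reverse).reverse with _ | ⟨c, v⟩
  · simp
  · rw [hBr] at hAeq
    have hc : c = a := by simpa using (congrArg (fun xs => xs.head?) hAeq).symm
    rw [List.dropWhile_cons, hc, ha]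
    simp

theorem pv_strip_idem (l : List Char) :
    PySem.Chars.strip (PySem.Chars.strip l) = PySem.Chars.strip l := by
  simp only [PySem.Chars.strip, PySem.Chars.lstrip, PySem.Chars.rstrip]
  rcases hAe : List.dropWhile PySem.Chars.isspace l with _ | ⟨a, t0⟩
  · simp
  · have ha := pv_head_false PySem.Chars.isspace l a t0 hAe
    rw [pv_key PySem.Chars.isspace a t0 ha, List.reverse_reverse, List.dropWhile_idempotent]

-- fold flattening -------------------------------------------------------------
theorem pv_foldl_flatMap {α β δ : Type} (xs : List α) (h : α → List β)
    (g : δ → β → δ) (d : δ) :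
    List.foldl g d (xs.flatMap h) = xs.foldl (fun d x => (h x).foldl g d) d := by
  induction xs generalizing d with
  | nil => rfl
  | cons x xs ih => simp [List.flatMap_cons, List.foldl_append, ih]

-- comma split -----------------------------------------------------------------
theorem pv_splitCommas_eq_aux (n : Nat) :
    ∀ s : List Char, s.length ≤ n → pvB_splitCommas s = pvSplit [','] s := by
  induction n with
  | zero =>
    intro s hlen
    have hs : s = [] := by
      rcases s with _ | _
      · rfl
      · simp at hlen
    subst hs
    rw [pvB_splitCommas, pv_pvSplit_nil [','] (by simp)]
    simp [pv_find_nil [','] (by simp)]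
  | succ n ih =>
    intro s hlen
    rw [pvB_splitCommas]
    by_cases hj : PySem.Chars.find s [','] = -1
    · rw [pv_pvSplit_single [','] s (by simp) hj]
      simp [hj]
    · have hs : s ≠ [] := pv_ne_nil_of_find_ne s [','] (by simp) hj
      have hlen' : (s.drop ((PySem.Chars.find s [',']).toNat + 1)).length ≤ n := by
        have : s.length ≠ 0 := by simpa [List.length_eq_zero_iff] using hs
        simp
        omega
      rw [pv_pvSplit_cons_eq [','] s (by simp) hj]
      simp only [hj, dite_false]
      rw [ih _ hlen']
      simp [List.length_cons]

theorem pv_splitCommas_eq (s : List Char) : pvB_splitCommas s = pvSplit [','] s :=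
  pv_splitCommas_eq_aux s.length s (le_refl _)

-- pairs -----------------------------------------------------------------------
def pvContrib (seg : List Char) : List (List Char × List Char) :=
  let seg := PySem.Chars.strip seg
  if seg = [] then []
  else
    let sp := PySem.Chars.find seg [' ']
    (pvB_splitCommas (seg.drop (sp.toNat + 1))).map
      (fun v => (PySem.Chars.strip v, seg.take sp.toNat))

theorem pv_pairs_eq_aux (n : Nat) :
    ∀ s : List Char, s.length ≤ n → pvB_pairs s = (pvSplit [';'] s).flatMap pvContrib := by
  induction n with
  | zero =>
    intro s hlen
    have hs : s = [] := by
      rcases s with _ | _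
      · rfl
      · simp at hlen
    subst hs
    rw [pvB_pairs, pv_pvSplit_nil [';'] (by simp)]
    simp [pv_find_nil [';'] (by simp), pvContrib]
  | succ n ih =>
    intro s hlen
    rw [pvB_pairs]
    by_cases hj : PySem.Chars.find s [';'] = -1
    · rw [pv_pvSplit_single [';'] s (by simp) hj]
      simp [hj, pvContrib]
    · have hs : s ≠ [] := pv_ne_nil_of_find_ne s [';'] (by simp) hj
      have hlen' : (s.drop ((PySem.Chars.find s [';']).toNat + 1)).length ≤ n := by
        have : s.length ≠ 0 := by simpa [List.length_eq_zero_iff] using hs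
        simp
        omega
      rw [pv_pvSplit_cons_eq [';'] s (by simp) hj]
      simp only [hj, dite_false, if_false]
      rw [ih _ hlen']
      simp [List.flatMap_cons, pvContrib]

theorem pv_pairs_eq (s : List Char) :
    pvB_pairs s = (pvSplit [';'] s).flatMap pvContrib :=
  pv_pairs_eq_aux s.length s (le_refl _)

-- per-piece equality ----------------------------------------------------------
theorem pv_sig1_eq (p : List Char) :
    pvA_sig1 p = PySem.Chars.strip
      (if PySem.Chars.find p ['-','>'] = -1 then p
       else p.take (PySem.Chars.find p ['-','>']).toNat) := by
  unfold pvA_sig1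
  rw [show PySem.Chars.splitMax? p ['-','>'] 1
      = some (PySem.Chars.splitOnMax p ['-','>'] 1) from by simp [PySem.Chars.splitMax?]]
  rw [pv_splitOnMax_one_eq ['-','>'] p (by simp)]
  by_cases hj : PySem.Chars.find p ['-','>'] = -1
  · rw [pv_pvSplit1_single _ _ hj]
    simp [hj]
  · rw [pv_pvSplit1_cons_eq _ _ hj]
    simp [hj]

theorem pv_dict_eq (sig : List Char) (hseg : pvSegsOk sig = true) :
    pvA_sigdict sig =
      (((pvB_pairs sig).foldl
        (fun (d : PySem.Dict (List Char) (List Char)) p => d.insert p.1 p.2)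
        PySem.Dict.empty).items).map (fun p => (String.ofList p.1, String.ofList p.2)) := by
  unfold pvA_sigdict
  have hsplit : (PySem.Chars.split? sig [';']).getD [] = pvSplit [';'] sig := by
    simp [PySem.Chars.split?]
    exact pv_splitOn_eq_pvSplit [';'] sig (by simp)
  rw [hsplit, pv_pairs_eq sig]
  refine congrArg (List.map _) (congrArg PySem.Dict.items ?_)
  rw [List.foldl_filter, List.foldl_map, pv_foldl_flatMap]
  apply PySem.List.foldl_congr_mem
  intro acc x hx
  have hok : PySem.Chars.strip x = [] ∨
      PySem.Chars.isIn [' '] (PySem.Chars.strip x) = true := by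
    unfold pvSegsOk at hseg
    rw [hsplit] at hseg
    have := List.all_eq_true.mp hseg x hx
    simpa using this
  by_cases hx0 : PySem.Chars.strip x = []
  · simp [hx0, pvContrib]
  · have hin : PySem.Chars.isIn [' '] (PySem.Chars.strip x) = true := by
      rcases hok with h' | h'
      · exact absurd h' hx0
      · exact h'
    have hinf : [' '] <:+: PySem.Chars.strip x := (PySem.Chars.isIn_iff_infix _ _).mp hin
    have hnn : 0 ≤ PySem.Chars.find (PySem.Chars.strip x) [' '] :=
      (PySem.Chars.find_nonneg_iff _ _).mpr hinf
    have hne : PySem.Chars.find (PySem.Chars.strip x) [' '] ≠ -1 := by omega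
    rw [if_pos (by simpa using hx0)]
    unfold pvA_entry
    rw [pv_strip_idem x]
    rw [show PySem.Chars.splitMax? (PySem.Chars.strip x) [' '] 1
        = some (PySem.Chars.splitOnMax (PySem.Chars.strip x) [' '] 1) from by
          simp [PySem.Chars.splitMax?]]
    rw [pv_splitOnMax_one_eq [' '] (PySem.Chars.strip x) (by simp)]
    rw [pv_pvSplit1_cons_eq [' '] (PySem.Chars.strip x) hne]
    simp only [Option.getD_some, List.getD_cons_zero, List.getD_cons_succ]
    have hvars : (PySem.Chars.split?
        ((PySem.Chars.strip x).drop
          ((PySem.Chars.find (PySem.Chars.strip x) [' ']).toNat + [' '].length)) [',']).getD []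
        = pvB_splitCommas ((PySem.Chars.strip x).drop
          ((PySem.Chars.find (PySem.Chars.strip x) [' ']).toNat + 1)) := by
      simp [PySem.Chars.split?]
      rw [pv_splitOn_eq_pvSplit [','] _ (by simp), pv_splitCommas_eq]
    rw [hvars]
    unfold pvContrib
    rw [if_neg hx0]
    simp only [List.foldl_map]

theorem pv_piece_eq (p : List Char) (h : pvSigOk (pvA_sig1 p) = true) :
    pvA_sigdict (pvA_trim (pvA_sig1 p)) = pvB_piece p := by
  simp only [pvB_piece]
  rw [← pv_sig1_eq p]
  unfold pvSigOk at h
  by_cases hsw : PySem.Chars.startswith (pvA_sig1 p) ['('] = true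
  · obtain ⟨t, ht⟩ : ∃ t, pvA_sig1 p = '(' :: t := by
      have hpre : ['('] <+: pvA_sig1 p := (PySem.Chars.startswith_iff _ _).mp hsw
      rcases hpre with ⟨u, hu⟩
      exact ⟨u, hu.symm⟩
    rw [if_pos hsw] at h
    have hhelp : pvA_findClose_go (pvA_sig1 p) 0 [] = pvB_findClose_go (pvA_sig1 p) 0 0 := by
      rw [ht]; exact pv_closeAB t
    have hcl : pvB_findClose_go (pvA_sig1 p) 0 0 = pvCloseIdx (pvA_sig1 p) := by
      rw [ht]; exact pv_close_spec t
    rcases hj : pvCloseIdx (pvA_sig1 p) with _ | j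
    · rw [hj] at h; simp at h
    · rw [hj] at h
      unfold pvA_trim
      rw [if_pos hsw, if_pos hsw, hhelp, hcl, hj]
      exact pv_dict_eq _ h
  · rw [if_neg hsw] at h ⊢
    unfold pvA_trim
    rw [if_neg hsw]
    exact pv_dict_eq _ h

theorem pv_parse_eq_aux (n : Nat) :
    ∀ s : List Char, s.length ≤ n →
      (∀ p ∈ pvSplit pvMarker s, pvSigOk (pvA_sig1 p) = true) →
      pvB_parse s = (pvSplit pvMarker s).map (fun p => pvA_sigdict (pvA_trim (pvA_sig1 p))) := by
  induction n with
  | zero =>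
    intro s hlen h
    have hs : s = [] := by
      rcases s with _ | _
      · rfl
      · simp at hlen
    subst hs
    have hj := pv_find_nil pvMarker (by simp [pvMarker])
    rw [pvB_parse, pv_pvSplit_nil pvMarker (by simp [pvMarker])]
    simp only [hj, dite_true, List.map_cons, List.map_nil]
    rw [pv_piece_eq [] (h [] (by rw [pv_pvSplit_nil pvMarker (by simp [pvMarker])]; simp))]
  | succ n ih =>
    intro s hlen h
    rw [pvB_parse]
    by_cases hj : PySem.Chars.find s pvMarker = -1
    · rw [pv_pvSplit_single pvMarker s (by simp [pvMarker]) hj]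
      simp only [hj, dite_true, List.map_cons, List.map_nil]
      rw [pv_piece_eq s (h s (by rw [pv_pvSplit_single pvMarker s (by simp [pvMarker]) hj]; simp))]
    · have hs : s ≠ [] := pv_ne_nil_of_find_ne s pvMarker (by simp [pvMarker]) hj
      have hcons := pv_pvSplit_cons_eq pvMarker s (by simp [pvMarker]) hj
      have hlen' : (s.drop ((PySem.Chars.find s pvMarker).toNat + pvMarker.length)).length ≤ n := by
        have : s.length ≠ 0 := by simpa [List.length_eq_zero_iff] using hs
        simp [pvMarker]
        omega
      have hmemtl : ∀ p ∈ pvSplit pvMarker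
          (s.drop ((PySem.Chars.find s pvMarker).toNat + pvMarker.length)),
          pvSigOk (pvA_sig1 p) = true := by
        intro p hp
        exact h p (by rw [hcons]; exact List.mem_cons_of_mem _ hp)
      rw [hcons]
      simp only [hj, dite_false, List.map_cons]
      rw [ih _ hlen' hmemtl,
        pv_piece_eq _ (h _ (by rw [hcons]; exact List.mem_cons_self ..))]

theorem pv_parse_eq (s : List Char)
    (h : ∀ p ∈ pvSplit pvMarker s, pvSigOk (pvA_sig1 p) = true) :
    pvB_parse s = (pvSplit pvMarker s).map (fun p => pvA_sigdict (pvA_trim (pvA_sig1 p))) :=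
  pv_parse_eq_aux s.length s (le_refl _) h

-- ===== VERDICT =====
theorem get_signatures_from_comments_spec : Claim_equal_get_signatures_from_comments := by
  intro comments _ hpre
  unfold Spec_get_signatures_from_comments
  unfold get_signatures_from_comments get_signatures_from_comments_alt
  unfold Pre_get_signatures_from_comments at hpre
  rw [PySem.List.foldl_append_singleton_eq_map, List.nil_append,
      PySem.List.foldl_append_singleton_eq_map, List.nil_append, List.map_map, List.map_map]
  have hsplit : (PySem.Chars.split?
      (PySem.Chars.replace (PySem.Chars.replace comments.toList ['#'] []) ['\n'] [])
      pvMarker).getD []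
      = pvSplit pvMarker
        (PySem.Chars.replace (PySem.Chars.replace comments.toList ['#'] []) ['\n'] []) := by
    simp [PySem.Chars.split?, pvMarker]
    exact pv_splitOn_eq_pvSplit pvMarker _ (by simp [pvMarker])
  rw [hsplit] at hpre ⊢
  set text := PySem.Chars.replace (PySem.Chars.replace comments.toList ['#'] []) ['\n'] []
    with htext
  by_cases hj : PySem.Chars.find text pvMarker = -1
  · rw [pv_pvSplit_single pvMarker text (by simp [pvMarker]) hj]
    simp [hj]
  · have hcons := pv_pvSplit_cons_eq pvMarker text (by simp [pvMarker]) hj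
    rw [hcons, if_neg hj]
    simp only [List.drop_succ_cons, List.drop_zero]
    rw [pv_parse_eq _ ?hmem]
    case hmem =>
      intro p hp
      rw [hcons] at hpre
      have := List.all_eq_true.mp (by simpa using hpre) p (by simpa using hp)
      simpa using this
    rfl
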